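-- pv_equiv track=rewrite | github.com/zhempstead/sato | crowd_gpt.py | parse_enresponse
-- ===== SOURCE A (Python) =====
-- def parse_enresponse(response):
--     response = response.lower()
--     out_lst = []
--     label_lst = ['city', 'state', 'category', 'class', 'name', 'description',
--                  'type', 'address', 'age', 'club', 'day', 'location', 'status',
--                  'result', 'year', 'album', 'code', 'position', 'company', 'symbol',
--                  'rank', 'country', 'team', 'county', 'weight', 'language', 'origin',
--                  'genre', 'gender', 'artist', 'collection', 'ranking', 'notes',
--                  'isbn', 'format', 'owner', 'nationality', 'order', 'area',
--                  'publisher', 'region', 'family', 'sex', 'component', 'elevation',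
--                  'capacity', 'range', 'duration', 'affiliation', 'teamName', 'plays',
--                  'director', 'credit', 'brand', 'jockey', 'product', 'grades',
--                  'requirement', 'command', 'education', 'birthPlace', 'currency',
--                  'continent', 'depth', 'service', 'industry', 'birthDate', 'sales',
--                  'creator', 'person', 'operator', 'species', 'classification',
--                  'manufacturer', 'fileSize', 'affiliate']
--
--     for label in label_lst:
--         start = 0
--         while True:
--             try:
--                 st_ind = response.index(label, start)
--                 start = st_ind + 1
--                 if label == 'age' and st_ind >= 5 and response[(st_ind - 5):].startswith('language'):
--                     continue
--                 out_lst.append((st_ind, label))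
--             except ValueError:
--                 break
--
--     if out_lst == []:
--         return []
--     else:
--         # sort the list on index, and return the labels
--         out_lst = sorted(out_lst, key=lambda x: x[0])
--         out_labels = [o[1] for o in out_lst]
--         return out_labels
-- ===== SOURCE B (Python) =====
-- LABELS = ['city', 'state', 'category', 'class', 'name', 'description',
--           'type', 'address', 'age', 'club', 'day', 'location', 'status',
--           'result', 'year', 'album', 'code', 'position', 'company', 'symbol',
--           'rank', 'country', 'team', 'county', 'weight', 'language', 'origin',
--           'genre', 'gender', 'artist', 'collection', 'ranking', 'notes',
--           'isbn', 'format', 'owner', 'nationality', 'order', 'area',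
--           'publisher', 'region', 'family', 'sex', 'component', 'elevation',
--           'capacity', 'range', 'duration', 'affiliation', 'teamName', 'plays',
--           'director', 'credit', 'brand', 'jockey', 'product', 'grades',
--           'requirement', 'command', 'education', 'birthPlace', 'currency',
--           'continent', 'depth', 'service', 'industry', 'birthDate', 'sales',
--           'creator', 'person', 'operator', 'species', 'classification',
--           'manufacturer', 'fileSize', 'affiliate']
--
-- def parse_enresponse(response):
--     # single left-to-right sweep over positions: at each index emit, in
--     # label-list order, every label that starts there (mirrors A's stable
--     # sort tie-break); no index()/sort needed.
--     text = response.lower()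
--     out = []
--     for i in range(len(text)):
--         for label in LABELS:
--             if text.startswith(label, i):
--                 if label == 'age' and i >= 5 and text.startswith('language', i - 5):
--                     continue
--                 out.append(label)
--     return out
-- ===== Notes on version B (the rewrite author's own statement) =====
-- stated objective: alternative
-- what changed: A scans label-by-label with repeated str.index calls, collects (position,label) pairs and stable-sorts them by position at the end; B makes one left-to-right sweep over the text positions and, at each index, emits in label-list order every label that starts there, so the output is already in A's order and no pair list or sort is needed.
import Mathlib
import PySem

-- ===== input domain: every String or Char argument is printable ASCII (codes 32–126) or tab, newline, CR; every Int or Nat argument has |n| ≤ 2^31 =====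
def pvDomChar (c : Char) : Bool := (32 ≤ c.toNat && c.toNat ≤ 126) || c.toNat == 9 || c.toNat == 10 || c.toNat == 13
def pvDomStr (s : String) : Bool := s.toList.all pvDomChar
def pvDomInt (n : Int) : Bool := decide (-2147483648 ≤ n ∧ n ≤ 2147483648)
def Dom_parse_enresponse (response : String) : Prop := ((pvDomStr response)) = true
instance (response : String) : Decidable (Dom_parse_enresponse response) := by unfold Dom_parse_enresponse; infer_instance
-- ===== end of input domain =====

-- B replaces A's label-major repeated index() scans plus a final stable sort by one
-- position-major left-to-right sweep that emits matching labels in list order (no sort);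
-- objective: alternative (same exact output, different algorithm).

-- the module's label list (A's local label_lst / B's LABELS constant)
def pyLabels : List String :=
  ["city", "state", "category", "class", "name", "description",
   "type", "address", "age", "club", "day", "location", "status",
   "result", "year", "album", "code", "position", "company", "symbol",
   "rank", "country", "team", "county", "weight", "language", "origin",
   "genre", "gender", "artist", "collection", "ranking", "notes",
   "isbn", "format", "owner", "nationality", "order", "area",
   "publisher", "region", "family", "sex", "component", "elevation",
   "capacity", "range", "duration", "affiliation", "teamName", "plays",
   "director", "credit", "brand", "jockey", "product", "grades",
   "requirement", "command", "education", "birthPlace", "currency",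
   "continent", "depth", "service", "industry", "birthDate", "sales",
   "creator", "person", "operator", "species", "classification",
   "manufacturer", "fileSize", "affiliate"]

-- ===== PORT A =====
-- A's inner 'while True' loop for one label: response.index(label, start) is
-- PySem.Chars.findFrom; ValueError (= -1) breaks; the 'age'-inside-'language' test uses
-- the slice response[st_ind-5:] exactly as A writes it.  The outer guard
-- 's.length < start' only makes the recursion total: Python's index raises there too.
-- A's inner 'while True' loop for one label: response.index(label, start) is
-- PySem.Chars.findFrom; ValueError (= -1) breaks; the 'age'-inside-'language' test uses
-- the slice response[st_ind-5:] exactly as A writes it.  The fuel argument and the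
-- 's.length < start' guard only make the recursion total (Python's index finds nothing
-- there either); loopA supplies fuel that never runs out.
def loopAgo (s : List Char) (lab : String) : Nat → Nat → List (Int × String)
  | 0, _ => []
  | fuel + 1, start =>
    if s.length < start then []
    else
      let r := PySem.Chars.findFrom s lab.toList (start : Int)
      if r = -1 then []
      else
        if lab == "age" && decide (5 ≤ r.toNat) &&
           PySem.Chars.startswith (PySem.List.slice s (some ((r.toNat : Int) - 5)) none) "language".toList
        then loopAgo s lab fuel (r.toNat + 1)
        else (r, lab) :: loopAgo s lab fuel (r.toNat + 1)

def loopA (s : List Char) (lab : String) (start : Nat) : List (Int × String) :=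
  loopAgo s lab (s.length + 1 - start) start

def parse_enresponse (response : String) : List String :=
  let s := (PySem.Str.lower response).toList
  let out_lst := pyLabels.foldl (fun acc label => acc ++ loopA s label 0) []
  if out_lst = [] then []
  else (PySem.List.sorted out_lst (fun x => x.1) false).map (fun o => o.2)

-- ===== PORT B =====
-- B's inner test: text.startswith(label, i) with 0 ≤ i ≤ len(text) is startswith on drop i;
-- the 'continue' branch is folded into one boolean, exactly Source B's condition.
def bKeep (s : List Char) (i : Nat) (lab : String) : Bool :=
  PySem.Chars.startswith (List.drop i s) lab.toList &&
  !(lab == "age" && decide (5 ≤ i) &&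
    PySem.Chars.startswith (List.drop (i - 5) s) "language".toList)

def parse_enresponse_alt (response : String) : List String :=
  let s := (PySem.Str.lower response).toList
  (List.range s.length).foldl
    (fun acc i =>
      pyLabels.foldl (fun acc2 label => if bKeep s i label then acc2 ++ [label] else acc2) acc)
    []

-- ===== PRECONDITION & SPEC =====
def Spec_parse_enresponse (response : String) (out : List String) : Prop := out = parse_enresponse_alt response
instance (response : String) (out : List String) : Decidable (Spec_parse_enresponse response out) := by unfold Spec_parse_enresponse; infer_instance

-- ===== CLAIM (what is proved, stated in full; the proofs are below) =====
def Claim_equal_parse_enresponse : Prop := ∀ (response : String), Dom_parse_enresponse response → Spec_parse_enresponse response (parse_enresponse response)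

-- ===== LEMMAS AND PROOFS =====

theorem insertBy_cons {α : Type} (b : α → α → Bool) (x y : α) (ys : List α) :
    PySem.List.insertBy b x (y :: ys) =
      if b x y then x :: y :: ys else y :: PySem.List.insertBy b x ys := rfl

theorem insertBy_append {α : Type} (b : α → α → Bool) (x : α) (pre post : List α)
    (h : ∀ y ∈ pre, b x y = false) :
    PySem.List.insertBy b x (pre ++ post) = pre ++ PySem.List.insertBy b x post := by
  induction pre with
  | nil => simp
  | cons y ys ih =>
      have hy : b x y = false := h y (by simp)
      rw [List.cons_append, insertBy_cons, hy]
      simp only [Bool.false_eq_true, if_false, List.cons_append, List.cons.injEq, true_and]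
      exact ih (fun z hz => h z (by simp [hz]))

theorem insertBy_all_before {α : Type} (b : α → α → Bool) (x : α) (post : List α)
    (h : ∀ y ∈ post, b x y = true) :
    PySem.List.insertBy b x post = x :: post := by
  cases post with
  | nil => rfl
  | cons y ys => rw [insertBy_cons, if_pos (h y (by simp))]

theorem insert_buckets {α : Type} (k : α → Int) (I : List Int) (hI : I.Pairwise (· < ·))
    (p : List α) (x : α) (hx : k x ∈ I) :
    PySem.List.insertBy (fun a b => decide (k a < k b)) x
        (I.flatMap (fun i => p.filter (fun a => k a == i)))
    = I.flatMap (fun i => (p ++ [x]).filter (fun a => k a == i)) := by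
  obtain ⟨I1, I2, rfl⟩ := List.append_of_mem hx
  rw [List.pairwise_append] at hI
  obtain ⟨hI1, hI2, hcross⟩ := hI
  rw [List.pairwise_cons] at hI2
  obtain ⟨hlt2, _⟩ := hI2
  have hlt1 : ∀ v ∈ I1, v < k x := fun v hv => hcross v hv (k x) (by simp)
  have hne1 : ∀ v ∈ I1, v ≠ k x := fun v hv => ne_of_lt (hlt1 v hv)
  have hne2 : ∀ v ∈ I2, v ≠ k x := fun v hv => (ne_of_lt (hlt2 v hv)).symm
  -- rewrite RHS buckets
  have hbR : ∀ (v : Int), v ≠ k x →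
      (p ++ [x]).filter (fun a => k a == v) = p.filter (fun a => k a == v) := by
    intro v hv
    rw [List.filter_append]
    simp [Ne.symm hv]
  have hbx : (p ++ [x]).filter (fun a => k a == k x) = p.filter (fun a => k a == k x) ++ [x] := by
    rw [List.filter_append]; simp
  rw [List.flatMap_append, List.flatMap_cons, List.flatMap_append, List.flatMap_cons]
  rw [insertBy_append]
  · rw [insertBy_append]
    · rw [insertBy_all_before]
      · rw [hbx]
        have : List.flatMap (fun i => (p ++ [x]).filter (fun a => k a == i)) I1
            = List.flatMap (fun i => p.filter (fun a => k a == i)) I1 :=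
          List.flatMap_congr (fun v hv => hbR v (hne1 v hv))
        have h2 : List.flatMap (fun i => (p ++ [x]).filter (fun a => k a == i)) I2
            = List.flatMap (fun i => p.filter (fun a => k a == i)) I2 :=
          List.flatMap_congr (fun v hv => hbR v (hne2 v hv))
        rw [this, h2]
        simp [List.append_assoc]
      · intro y hy
        rw [List.mem_flatMap] at hy
        obtain ⟨v, hv, hyv⟩ := hy
        rw [List.mem_filter] at hyv
        have : k y = v := by simpa using hyv.2
        simp only [decide_eq_true_eq]
        rw [this]; exact hlt2 v hv
    · intro y hy
      rw [List.mem_filter] at hy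
      have : k y = k x := by simpa using hy.2
      simp [this]
  · intro y hy
    rw [List.mem_flatMap] at hy
    obtain ⟨v, hv, hyv⟩ := hy
    rw [List.mem_filter] at hyv
    have : k y = v := by simpa using hyv.2
    simp only [decide_eq_false_iff_not]
    rw [this]
    exact not_lt.mpr (le_of_lt (hlt1 v hv))

theorem sorted_eq_buckets {α : Type} (k : α → Int) (I : List Int) (hI : I.Pairwise (· < ·))
    (xs : List α) (hxs : ∀ x ∈ xs, k x ∈ I) :
    PySem.List.sorted xs k false = I.flatMap (fun i => xs.filter (fun a => k a == i)) := by
  induction xs using List.reverseRecOn with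
  | nil =>
      have h0 : PySem.List.sorted ([] : List α) k false = [] :=
        (PySem.List.sorted_eq_nil_iff _ _ _).mpr rfl
      simp [h0]
  | append_singleton p x ih =>
      rw [PySem.List.sorted_eq_foldl_insertBy, List.foldl_append, List.foldl_cons, List.foldl_nil,
        ← PySem.List.sorted_eq_foldl_insertBy]
      rw [ih (fun y hy => hxs y (by simp [hy]))]
      exact insert_buckets k I hI p x (hxs x (by simp))

theorem filter_range_split (n st : Nat) (K : Nat → Bool) (h : st < n) :
    (List.range n).filter (fun i => decide (st ≤ i) && K i)
      = (if K st then [st] else []) ++ (List.range n).filter (fun i => decide (st + 1 ≤ i) && K i) := by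
  induction n with
  | zero => omega
  | succ m ih =>
    rw [List.range_succ, List.filter_append, List.filter_append]
    by_cases hm : st < m
    · rw [ih hm]
      have h1 : decide (st ≤ m) = true := by simp; omega
      have h2 : decide (st + 1 ≤ m) = true := by simp; omega
      simp [List.filter_cons, h1, h2, List.append_assoc, hm]
    · have hst : st = m := by omega
      subst hst
      have e1 : (List.range st).filter (fun i => decide (st ≤ i) && K i) = [] := by
        rw [List.filter_eq_nil_iff]; intro a ha; simp at ha ⊢; omega
      have e2 : (List.range st).filter (fun i => decide (st + 1 ≤ i) && K i) = [] := by
        rw [List.filter_eq_nil_iff]; intro a ha; simp at ha ⊢; omega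
      simp [e1, e2, List.filter_cons]
      intro a _ ha2; omega

theorem found_filter (s : List Char) (lab : String) (start : Nat) (hl : lab.toList ≠ [])
    (hs : ¬ s.length < start) (hr : ¬ PySem.Chars.findFrom s lab.toList ↑start = -1) :
    (PySem.Chars.findFrom s lab.toList ↑start).toNat < s.length ∧
    start ≤ (PySem.Chars.findFrom s lab.toList ↑start).toNat ∧
    PySem.Chars.findFrom s lab.toList ↑start = (((PySem.Chars.findFrom s lab.toList ↑start).toNat : Nat) : Int) ∧
    ((List.range s.length).filter (fun i => decide (start ≤ i) && bKeep s i lab)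
      = (if bKeep s (PySem.Chars.findFrom s lab.toList ↑start).toNat lab
          then [(PySem.Chars.findFrom s lab.toList ↑start).toNat] else [])
        ++ (List.range s.length).filter
            (fun i => decide ((PySem.Chars.findFrom s lab.toList ↑start).toNat + 1 ≤ i) && bKeep s i lab)) ∧
    (bKeep s (PySem.Chars.findFrom s lab.toList ↑start).toNat lab
      = !(lab == "age" && decide (5 ≤ (PySem.Chars.findFrom s lab.toList ↑start).toNat) &&
          PySem.Chars.startswith
            (PySem.List.slice s (some (((PySem.Chars.findFrom s lab.toList ↑start).toNat : Int) - 5)) none)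
            "language".toList)) := by
  have hk : start ≤ s.length := Nat.le_of_not_lt hs
  obtain ⟨hstart_le, hpre, hmin⟩ := PySem.Chars.findFrom_natCast_spec s lab.toList start hk hr
  have hr0 : (0 : Int) ≤ PySem.Chars.findFrom s lab.toList ↑start :=
    le_trans (by positivity) hstart_le
  set st := (PySem.Chars.findFrom s lab.toList ↑start).toNat with hstdef
  have hrst : PySem.Chars.findFrom s lab.toList ↑start = (st : Int) := (Int.toNat_of_nonneg hr0).symm
  have hle : start ≤ st := by
    have := hstart_le; rw [hrst] at this; exact_mod_cast this
  have hstlt : st < s.length := by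
    by_contra hcon
    have hdn : List.drop st s = [] := List.drop_eq_nil_of_le (by omega)
    rw [hdn] at hpre
    exact hl (List.prefix_nil.mp hpre)
  have hsw : PySem.Chars.startswith (List.drop st s) lab.toList = true :=
    (PySem.Chars.startswith_iff _ _).mpr hpre
  refine ⟨hstlt, hle, hrst, ?_, ?_⟩
  · have hcong : (List.range s.length).filter (fun i => decide (start ≤ i) && bKeep s i lab)
        = (List.range s.length).filter (fun i => decide (st ≤ i) && bKeep s i lab) := by
      apply List.filter_congr
      intro a ha
      simp only [List.mem_range] at ha
      by_cases h1 : st ≤ a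
      · have h2 : start ≤ a := le_trans hle h1
        simp [h1, h2]
      · by_cases h2 : start ≤ a
        · have hnp := hmin a h2 (by omega)
          have hf : PySem.Chars.startswith (List.drop a s) lab.toList = false := by
            rw [← Bool.not_eq_true]
            simp only [PySem.Chars.startswith_iff]
            exact hnp
          simp [bKeep, hf, h1]
        · simp [h1, h2]
    rw [hcong]
    exact filter_range_split s.length st (fun i => bKeep s i lab) hstlt
  · by_cases h5 : 5 ≤ st
    · have hcast : ((st : Int) - 5) = ((st - 5 : Nat) : Int) := by omega
      rw [hcast, PySem.List.slice_from_natCast]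
      simp [bKeep, hsw]
    · simp [bKeep, hsw, h5]

theorem loopAgo_eq (s : List Char) (lab : String) (hl : lab.toList ≠ []) :
    ∀ (fuel start : Nat), s.length + 1 ≤ fuel + start →
    loopAgo s lab fuel start
      = ((List.range s.length).filter (fun i => decide (start ≤ i) && bKeep s i lab)).map
          (fun i : Nat => ((i : Int), lab)) := by
  intro fuel
  induction fuel with
  | zero =>
      intro start hfs
      have hfil : (List.range s.length).filter (fun i => decide (start ≤ i) && bKeep s i lab) = [] := by
        rw [List.filter_eq_nil_iff]; intro a ha
        simp only [List.mem_range] at ha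
        have : decide (start ≤ a) = false := by simp; omega
        simp [this]
      rw [hfil]; rfl
  | succ f ih =>
      intro start hfs
      by_cases hs : s.length < start
      · rw [loopAgo, if_pos hs]
        have hfil : (List.range s.length).filter (fun i => decide (start ≤ i) && bKeep s i lab) = [] := by
          rw [List.filter_eq_nil_iff]; intro a ha
          simp only [List.mem_range] at ha
          have : decide (start ≤ a) = false := by simp; omega
          simp [this]
        rw [hfil]; rfl
      · have hk : start ≤ s.length := Nat.le_of_not_lt hs
        by_cases hr : PySem.Chars.findFrom s lab.toList (start : Int) = -1
        · rw [loopAgo, if_neg hs]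
          simp only [if_pos hr]
          have hninf : ¬ lab.toList <:+: List.drop start s :=
            (PySem.Chars.findFrom_natCast_eq_neg_one_iff s lab.toList start hk).mp hr
          have hno : ∀ i, start ≤ i → ¬ (lab.toList <+: List.drop i s) := by
            intro i hi hpre
            apply hninf
            apply (PySem.Chars.isIn_iff_infix _ _).mp
            apply (PySem.Chars.exists_prefix_drop_iff_isIn _ _).mp
            refine ⟨i - start, ?_⟩
            rw [List.drop_drop]
            have heq : start + (i - start) = i := by omega
            rw [heq]; exact hpre
          have hfil : (List.range s.length).filter (fun i => decide (start ≤ i) && bKeep s i lab) = [] := by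
            rw [List.filter_eq_nil_iff]; intro a ha
            simp only [List.mem_range] at ha
            by_cases hsa : start ≤ a
            · have hf : PySem.Chars.startswith (List.drop a s) lab.toList = false := by
                rw [← Bool.not_eq_true]
                simp only [PySem.Chars.startswith_iff]
                exact hno a hsa
              simp [bKeep, hf]
            · simp [hsa]
          rw [hfil]; rfl
        · obtain ⟨hstlt, hle, hrst, hsplit, hbk⟩ := found_filter s lab start hl hs hr
          have ihr := ih ((PySem.Chars.findFrom s lab.toList (start : Int)).toNat + 1) (by omega)
          rw [loopAgo, if_neg hs]
          simp only [if_neg hr]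
          by_cases hcond : (lab == "age" &&
              decide (5 ≤ (PySem.Chars.findFrom s lab.toList (start : Int)).toNat) &&
              PySem.Chars.startswith
                (PySem.List.slice s
                  (some (((PySem.Chars.findFrom s lab.toList (start : Int)).toNat : Int) - 5)) none)
                "language".toList) = true
          · rw [if_pos hcond]
            have hbfalse : bKeep s (PySem.Chars.findFrom s lab.toList ↑start).toNat lab = false := by
              rw [hbk, hcond]; rfl
            rw [hsplit, if_neg (by simp [hbfalse]), ihr, List.nil_append]
          · rw [if_neg hcond]
            have hbtrue : bKeep s (PySem.Chars.findFrom s lab.toList ↑start).toNat lab = true := by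
              rw [hbk]
              simp only [Bool.not_eq_true']
              exact Bool.not_eq_true _ ▸ (by simpa using hcond)
            rw [hsplit, if_pos hbtrue, ihr, List.singleton_append, List.map_cons]
            exact congrArg₂ List.cons (by rw [← hrst]) rfl

theorem loopA_eq (s : List Char) (lab : String) (start : Nat) (hl : lab.toList ≠ []) :
    loopA s lab start
      = ((List.range s.length).filter (fun i => decide (start ≤ i) && bKeep s i lab)).map
          (fun i : Nat => ((i : Int), lab)) := by
  rw [loopA]
  exact loopAgo_eq s lab hl (s.length + 1 - start) start (by omega)

theorem range_filter_eq (n i : Nat) (K : Nat → Bool) (h : i < n) :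
    (List.range n).filter (fun j => K j && (j == i)) = if K i then [i] else [] := by
  induction n with
  | zero => omega
  | succ m ih =>
    rw [List.range_succ, List.filter_append]
    by_cases him : i < m
    · rw [ih him]
      have hne : (m == i) = false := by simp; omega
      simp [List.filter_cons, hne]
    · have : i = m := by omega
      subst this
      have e1 : (List.range i).filter (fun j => K j && (j == i)) = [] := by
        rw [List.filter_eq_nil_iff]; intro a ha; simp at ha ⊢; intro _; omega
      simp [e1, List.filter_cons]

theorem flatMap_if_singleton {α β : Type} (p : α → Bool) (f : α → β) (l : List α) :
    l.flatMap (fun a => if p a then [f a] else []) = (l.filter p).map f := by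
  induction l with
  | nil => rfl
  | cons x xs ih => by_cases hx : p x <;> simp [List.filter_cons, hx, ih]

-- ===== VERDICT (by name: the statement is the Claim_ definition above) =====
theorem parse_enresponse_spec : Claim_equal_parse_enresponse := by
  intro response _
  show parse_enresponse response = parse_enresponse_alt response
  simp only [parse_enresponse, parse_enresponse_alt]
  set s := (PySem.Str.lower response).toList with hsdef
  set n := s.length with hndef
  have hlabs : ∀ lab ∈ pyLabels, lab.toList ≠ [] := by decide
  have houtl : pyLabels.foldl (fun acc label => acc ++ loopA s label 0) []
      = pyLabels.flatMap (fun lab =>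
          ((List.range n).filter (fun i => bKeep s i lab)).map (fun i : Nat => ((i : Int), lab))) := by
    rw [PySem.List.foldl_append_eq_flatMap, List.nil_append]
    apply List.flatMap_congr
    intro lab hlab
    rw [loopA_eq s lab 0 (hlabs lab hlab)]
    simp
    rfl
  have hB : (List.range n).foldl
        (fun acc i => pyLabels.foldl
          (fun acc2 label => if bKeep s i label then acc2 ++ [label] else acc2) acc) []
      = (List.range n).flatMap (fun i => pyLabels.filter (fun lab => bKeep s i lab)) := by
    rw [PySem.List.foldl_congr_mem (List.range n) _
      (fun acc i => acc ++ pyLabels.filter (fun lab => bKeep s i lab)) []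
      (fun acc i _ => PySem.List.foldl_append_if_eq_filter _ _ _)]
    rw [PySem.List.foldl_append_eq_flatMap, List.nil_append]
  have hsorted : PySem.List.sorted
        (pyLabels.flatMap (fun lab =>
          ((List.range n).filter (fun i => bKeep s i lab)).map (fun i : Nat => ((i : Int), lab))))
        (fun x => x.1) false
      = (List.range n).flatMap (fun i =>
          (pyLabels.filter (fun lab => bKeep s i lab)).map (fun lab => ((i : Int), lab))) := by
    refine (sorted_eq_buckets (fun x : Int × String => x.1)
      ((List.range n).map (Nat.cast)) ?hI _ ?hxs).trans ?_
    case hI =>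
      simp only [List.pairwise_map]
      exact List.pairwise_lt_range.imp (fun h => by exact_mod_cast h)
    case hxs =>
      intro x hx
      rw [List.mem_flatMap] at hx
      obtain ⟨lab, _, hx2⟩ := hx
      rw [List.mem_map] at hx2
      obtain ⟨j, hj, rfl⟩ := hx2
      rw [List.mem_filter, List.mem_range] at hj
      simp only [List.mem_map, List.mem_range]
      exact ⟨j, hj.1, rfl⟩
    rw [List.flatMap_map]
    apply List.flatMap_congr
    intro i hi
    rw [List.mem_range] at hi
    rw [List.filter_flatMap]
    have hper : ∀ lab ∈ pyLabels,
        (((List.range n).filter (fun j => bKeep s j lab)).map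
            (fun j : Nat => ((j : Int), lab))).filter (fun a => a.1 == (i : Int))
        = if bKeep s i lab then [((i : Int), lab)] else [] := by
      intro lab _
      rw [List.filter_map, List.filter_filter]
      have hpred : ∀ j ∈ List.range n,
          (((fun a : Int × String => a.1 == (i : Int)) ∘ (fun j : Nat => ((j : Int), lab))) j
            && bKeep s j lab)
          = (bKeep s j lab && (j == i)) := by
        intro j _
        simp only [Function.comp]
        by_cases hji : j = i
        · subst hji; simp
        · have h1 : ((j : Int) == (i : Int)) = false := by simp; exact_mod_cast hji
          have h2 : (j == i) = false := by simp [hji]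
          simp [h1, h2]
      rw [List.filter_congr hpred, range_filter_eq n i _ hi]
      by_cases hbi : bKeep s i lab <;> simp [hbi]
    rw [List.flatMap_congr hper, flatMap_if_singleton]
  have hmap : ((List.range n).flatMap (fun i =>
        (pyLabels.filter (fun lab => bKeep s i lab)).map (fun lab => ((i : Int), lab)))).map
          (fun o => o.2)
      = (List.range n).flatMap (fun i => pyLabels.filter (fun lab => bKeep s i lab)) := by
    rw [List.map_flatMap]
    apply List.flatMap_congr
    intro i _
    rw [List.map_map]
    simp
  rw [houtl, hB]
  by_cases hempty : pyLabels.flatMap (fun lab =>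
      ((List.range n).filter (fun i => bKeep s i lab)).map (fun i : Nat => ((i : Int), lab))) = []
  · rw [if_pos hempty]
    have h0 : (List.range n).flatMap (fun i =>
        (pyLabels.filter (fun lab => bKeep s i lab)).map (fun lab => ((i : Int), lab))) = [] := by
      rw [← hsorted, hempty]
      exact (PySem.List.sorted_eq_nil_iff _ _ _).mpr rfl
    rw [← hmap, h0]
    rfl
  · rw [if_neg hempty, hsorted, hmap]
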